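-- pv_equiv track=rewrite | github.com/ayaan2340/webots-fixed-network | controllers/NEATSupervisor/main.py | distribute_genomes_evenly
-- ===== SOURCE A (Python) =====
-- def distribute_genomes_evenly(genomes, processor_count):
--     total_genomes = len(genomes)
--     batch_size = total_genomes // processor_count
--     extra_size = batch_size + 1  # Number of genomes for batches with one extra genome
--     extra_batches = total_genomes % processor_count
--     batches = []
--
--     genome_index = 0
--     # Distribute batches with the extra genome
--     for _ in range(extra_batches):
--         batch = genomes[genome_index:genome_index + extra_size]
--         batches.append(batch)
--         genome_index += extra_size
--
--     # Distribute batches with the base genome size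
--     for _ in range(processor_count - extra_batches):
--         batch = genomes[genome_index:genome_index + batch_size]
--         batches.append(batch)
--         genome_index += batch_size
--
--     return batches
-- ===== SOURCE B (Python) =====
-- def distribute_genomes_evenly(genomes, processor_count):
--     q, r = divmod(len(genomes), processor_count)
--     return [genomes[i * q + min(i, r): (i + 1) * q + min(i + 1, r)]
--             for i in range(processor_count)]
-- ===== Notes on version B (the rewrite author's own statement) =====
-- stated objective: simpler
-- what changed: Replaces A's two sequential loops with a running genome_index accumulator by a single comprehension over range(processor_count) that computes each batch's slice bounds in closed form from divmod(len(genomes), processor_count).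
import Mathlib
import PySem

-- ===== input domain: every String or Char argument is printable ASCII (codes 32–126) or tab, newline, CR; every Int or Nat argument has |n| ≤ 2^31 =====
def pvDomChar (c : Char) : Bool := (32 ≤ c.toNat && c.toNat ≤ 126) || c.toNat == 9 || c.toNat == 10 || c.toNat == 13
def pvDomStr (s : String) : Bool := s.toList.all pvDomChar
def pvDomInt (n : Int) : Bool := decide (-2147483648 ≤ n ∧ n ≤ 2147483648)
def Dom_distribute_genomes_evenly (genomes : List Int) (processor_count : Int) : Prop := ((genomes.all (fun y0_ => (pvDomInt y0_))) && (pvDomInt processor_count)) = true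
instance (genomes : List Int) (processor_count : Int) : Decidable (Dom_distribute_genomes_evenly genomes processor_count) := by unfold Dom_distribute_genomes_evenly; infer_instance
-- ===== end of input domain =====

-- B replaces A's two sequential loops with a running index by one pass computing
-- each batch's slice bounds in closed form (objective: simpler; return value only).

-- ===== PORT A =====
def distribute_genomes_evenly (genomes : List Int) (processor_count : Int) : List (List Int) :=
  let total_genomes : Int := genomes.length
  let batch_size := PySem.Int.floordiv total_genomes processor_count
  let extra_size := batch_size + 1
  let extra_batches := PySem.Int.mod total_genomes processor_count
  let s1 := (PySem.List.pyRange 0 extra_batches 1).foldl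
    (fun (st : List (List Int) × Int) _ =>
      (st.1 ++ [PySem.List.slice genomes (some st.2) (some (st.2 + extra_size))], st.2 + extra_size))
    ([], 0)
  let s2 := (PySem.List.pyRange 0 (processor_count - extra_batches) 1).foldl
    (fun (st : List (List Int) × Int) _ =>
      (st.1 ++ [PySem.List.slice genomes (some st.2) (some (st.2 + batch_size))], st.2 + batch_size))
    s1
  s2.1

-- ===== PORT B =====
def distribute_genomes_evenly_alt (genomes : List Int) (processor_count : Int) : List (List Int) :=
  let q := PySem.Int.floordiv genomes.length processor_count
  let r := PySem.Int.mod genomes.length processor_count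
  (PySem.List.pyRange 0 processor_count 1).map (fun i =>
    PySem.List.slice genomes (some (i * q + min i r)) (some ((i + 1) * q + min (i + 1) r)))

-- ===== PRECONDITION & SPEC =====
-- A raises ZeroDivisionError exactly when processor_count == 0.
def Pre_distribute_genomes_evenly (genomes : List Int) (processor_count : Int) : Prop :=
  processor_count ≠ 0
instance (genomes : List Int) (processor_count : Int) : Decidable (Pre_distribute_genomes_evenly genomes processor_count) := by unfold Pre_distribute_genomes_evenly; infer_instance

def pvWitness_distribute_genomes_evenly : List Int × Int := ([1, 2, 3, 4, 5], 2)

def Spec_distribute_genomes_evenly (genomes : List Int) (processor_count : Int) (out : List (List Int)) : Prop := out = distribute_genomes_evenly_alt genomes processor_count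
instance (genomes : List Int) (processor_count : Int) (out : List (List Int)) : Decidable (Spec_distribute_genomes_evenly genomes processor_count out) := by unfold Spec_distribute_genomes_evenly; infer_instance

-- ===== CLAIM (what is proved, stated in full; the proofs are below) =====
def Claim_equal_distribute_genomes_evenly : Prop := ∀ (genomes : List Int) (processor_count : Int), Dom_distribute_genomes_evenly genomes processor_count → Pre_distribute_genomes_evenly genomes processor_count → Spec_distribute_genomes_evenly genomes processor_count (distribute_genomes_evenly genomes processor_count)

-- ===== LEMMAS AND PROOFS =====

-- A's accumulator loop over n iterations with step s, characterised in closed form.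
theorem foldl_batches (genomes : List Int) (s : Int) :
    ∀ (n : Nat) (acc : List (List Int)) (g : Int),
      (List.range n).foldl
        (fun (st : List (List Int) × Int) (_ : Nat) =>
          (st.1 ++ [PySem.List.slice genomes (some st.2) (some (st.2 + s))], st.2 + s))
        (acc, g)
      = (acc ++ (List.range n).map
          (fun (i : Nat) => PySem.List.slice genomes (some (g + (i : Int) * s)) (some (g + ((i : Int) + 1) * s))),
         g + n * s) := by
  intro n
  induction n with
  | zero => intro acc g; simp
  | succ n ih =>
    intro acc g
    rw [List.range_succ, List.foldl_append, ih]
    simp only [List.foldl_cons, List.foldl_nil, List.map_append, List.map_cons, List.map_nil,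
      List.append_assoc, Prod.mk.injEq]
    have hb : g + (n : Int) * s + s = g + ((n : Int) + 1) * s := by ring
    constructor
    · rw [hb]
    · push_cast; ring

theorem foldl_pyRange_batches (genomes : List Int) (s m : Int) (acc : List (List Int)) (g : Int) :
    (PySem.List.pyRange 0 m 1).foldl
      (fun (st : List (List Int) × Int) (_ : Int) =>
        (st.1 ++ [PySem.List.slice genomes (some st.2) (some (st.2 + s))], st.2 + s))
      (acc, g)
    = (acc ++ (List.range m.toNat).map
        (fun (i : Nat) => PySem.List.slice genomes (some (g + (i : Int) * s)) (some (g + ((i : Int) + 1) * s))),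
       g + m.toNat * s) := by
  rw [PySem.List.pyRange_one, List.foldl_map]
  simpa using foldl_batches genomes s m.toNat acc g

-- ===== VERDICT (by name: the statement is the Claim_ definition above) =====
theorem distribute_genomes_evenly_spec : Claim_equal_distribute_genomes_evenly := by
  intro genomes pc _ hpc
  unfold Spec_distribute_genomes_evenly distribute_genomes_evenly distribute_genomes_evenly_alt
  simp only []
  set L : Int := (genomes.length : Int) with hL
  set q := PySem.Int.floordiv L pc with hq
  set r := PySem.Int.mod L pc with hr
  rcases lt_trichotomy pc 0 with hneg | hz | hpos
  · -- pc < 0 : all three ranges are empty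
    obtain ⟨h1, h2⟩ := PySem.Int.mod_neg_bounds (a := L) (b := pc) hneg
    rw [PySem.List.pyRange_one_eq_nil (by omega), PySem.List.pyRange_one_eq_nil (by omega),
      PySem.List.pyRange_one_eq_nil (by omega)]
    simp
  · exact absurd hz hpc
  · -- pc > 0 : 0 ≤ r < pc
    have hr0 : 0 ≤ r := PySem.Int.mod_nonneg L hpos
    have hrlt : r < pc := PySem.Int.mod_lt L hpos
    rw [foldl_pyRange_batches]
    dsimp only
    rw [foldl_pyRange_batches, PySem.List.pyRange_one]
    dsimp only
    simp only [List.nil_append, zero_add, sub_zero, List.map_map]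
    have hsplit : pc.toNat = r.toNat + (pc - r).toNat := by omega
    rw [hsplit, List.range_add, List.map_append, List.map_map]
    congr 1
    · -- first r batches, size q+1
      apply List.map_congr_left
      intro k hk
      rw [List.mem_range] at hk
      have h1 : min ((k : Int)) r = (k : Int) := by omega
      have h2 : min ((k : Int) + 1) r = (k : Int) + 1 := by omega
      simp only [Function.comp, zero_add, h1, h2]
      congr 2 <;> push_cast <;> ring
    · -- remaining pc - r batches, size q
      apply List.map_congr_left
      intro j hj
      rw [List.mem_range] at hj
      have hrc : ((r.toNat : Int)) = r := by omega
      have h1 : min (((r.toNat + j : Nat) : Int)) r = r := by push_cast [hrc]; omega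
      have h2 : min (((r.toNat + j : Nat) : Int) + 1) r = r := by push_cast [hrc]; omega
      simp only [Function.comp, zero_add, h1, h2]
      congr 2 <;> push_cast [hrc] <;> ring
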